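-- pv_equiv track=rewrite | github.com/Seanman519/RLBOT | rlbot/utils/utils.py | add_underscores
-- ===== SOURCE A (Python) =====
-- def add_underscores(num):
--     """Adds underscores to a number every third digit.
--
--     Args:
--         num (int or str):
--             The number to add underscores to.
--
--     Returns:
--         str:
--             The number with underscores added.
--     """
--     num_str = str(num)  # convert the number to a string
--     num_len = len(num_str)
--     underscored_num = ""
--     for i in range(num_len):
--         underscored_num += num_str[i]
--         if (num_len - i - 1) % 3 == 0 and i != num_len - 1:
--             underscored_num += "_"
--     return underscored_num
-- ===== SOURCE B (Python) =====
-- def add_underscores(num):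
--     """Adds underscores to a number every third digit (grouping from the right)."""
--     rev = str(num)[::-1]
--     chunks = []
--     while rev:
--         chunks.append(rev[:3])
--         rev = rev[3:]
--     return "_".join(chunks)[::-1]
-- ===== Notes on version B (the rewrite author's own statement) =====
-- stated objective: idiomatic
-- what changed: Replaces A's index loop with a per-position modular test by the idiomatic grouping pipeline: reverse str(num), split into chunks of three, join with '_', reverse back.
import Mathlib
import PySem

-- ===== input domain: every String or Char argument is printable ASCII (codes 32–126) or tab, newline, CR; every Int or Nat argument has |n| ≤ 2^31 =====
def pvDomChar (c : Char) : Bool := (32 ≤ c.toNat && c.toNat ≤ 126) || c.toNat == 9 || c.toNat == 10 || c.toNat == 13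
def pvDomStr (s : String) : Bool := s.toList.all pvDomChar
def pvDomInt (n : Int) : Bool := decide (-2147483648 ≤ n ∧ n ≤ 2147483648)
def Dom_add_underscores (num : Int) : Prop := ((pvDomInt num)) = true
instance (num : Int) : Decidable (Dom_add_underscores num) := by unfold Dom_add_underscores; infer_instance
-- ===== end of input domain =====

-- B replaces A's index loop with reverse / chunk-into-threes / join-with-'_' / reverse (idiomatic grouping from the right).

-- ===== PORT A =====
-- literal port of A's loop: walk the indices, append each character, and append '_'
-- when (num_len - i - 1) % 3 == 0 and i is not the last index (strings as List Char).
def add_underscores (num : Int) : String :=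
  let num_str : List Char := PySem.Int.toChars num
  let num_len : Int := (num_str.length : Int)
  let out : List Char :=
    (PySem.List.pyRange 0 num_len 1).foldl
      (fun acc i =>
        let acc := acc ++ (PySem.List.pyGet? num_str i).toList
        if PySem.Int.mod (num_len - i - 1) 3 = 0 ∧ i ≠ num_len - 1 then acc ++ ['_'] else acc)
      []
  String.mk out

-- ===== PORT B =====
-- B-side helper: split a char list into successive chunks of 3 (Source B's while-loop).
def pvChunks3 : List Char → List (List Char)
  | [] => []
  | c :: t => ((c :: t).take 3) :: pvChunks3 ((c :: t).drop 3)
  termination_by s => s.length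
  decreasing_by simp

-- port of B: reverse str(num), chunk into threes, join with '_', reverse back.
def add_underscores_alt (num : Int) : String :=
  let rev : List Char := (PySem.Int.toChars num).reverse
  String.mk ((PySem.Chars.join ['_'] (pvChunks3 rev)).reverse)

-- ===== PRECONDITION & SPEC =====
def Spec_add_underscores (num : Int) (out : String) : Prop := out = add_underscores_alt num
instance (num : Int) (out : String) : Decidable (Spec_add_underscores num out) := by unfold Spec_add_underscores; infer_instance

-- ===== CLAIM (what is proved, stated in full; the proofs are below) =====
def Claim_equal_add_underscores : Prop := ∀ (num : Int), Dom_add_underscores num → Spec_add_underscores num (add_underscores num)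

-- ===== LEMMAS AND PROOFS =====

-- A's underscore rule, written as structural recursion: after a character followed by
-- t, an underscore is placed iff t.length % 3 = 0 and t ≠ [].
def pvF : List Char → List Char
  | [] => []
  | c :: t => if t.length % 3 = 0 ∧ t ≠ [] then c :: '_' :: pvF t else c :: pvF t

-- same but an underscore also after the last character
def pvF' : List Char → List Char
  | [] => []
  | c :: t => if t.length % 3 = 0 then c :: '_' :: pvF' t else c :: pvF' t

theorem pvF_short (s : List Char) (h : s.length ≤ 3) : pvF s = s := by
  match s, h with
  | [], _ => rfl
  | [a], _ => simp [pvF]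
  | [a, b], _ => simp [pvF]
  | [a, b, c], _ => simp [pvF]

theorem pvF_append3 (s u : List Char) (hu : u.length = 3) :
    pvF (s ++ u) = pvF' s ++ u := by
  induction s with
  | nil => simp [pvF', pvF_short u (by omega)]
  | cons c t ih =>
      have hlen : (t ++ u).length = t.length + 3 := by simp [hu]
      have hne : t ++ u ≠ [] := by
        intro h; have := congrArg List.length h; simp [hlen] at this
      by_cases h3 : t.length % 3 = 0
      · simp [pvF, pvF', hlen, h3, hne, ih]
      · simp [pvF, pvF', hlen, h3, ih]

theorem pvF'_eq (s : List Char) (h : s ≠ []) : pvF' s = pvF s ++ ['_'] := by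
  induction s with
  | nil => exact absurd rfl h
  | cons c t ih =>
      cases t with
      | nil => simp [pvF, pvF']
      | cons d t' =>
          have ihe := ih (by simp)
          rw [pvF', pvF, ihe]
          split_ifs <;> simp_all

-- the chunking identity: A's rule on the reversed list is join-with-'_' of the chunks
theorem pvF_rev : ∀ (r : List Char),
    pvF r.reverse = (PySem.Chars.join ['_'] (pvChunks3 r)).reverse
  | [] => by simp [pvChunks3, pvF]
  | c :: t => by
      by_cases hlen : t.length ≤ 2
      · -- one chunk
        have hdrop : (c :: t).drop 3 = [] := by
          apply List.eq_nil_of_length_eq_zero; simp; omega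
        have htake : (c :: t).take 3 = c :: t := List.take_of_length_le (by simp; omega)
        rw [pvChunks3, hdrop, htake]
        have hs := pvF_short (c :: t).reverse (by simp; omega)
        simpa [pvChunks3, PySem.Chars.join_singleton] using hs
      · -- at least two chunks
        have h4 : 3 ≤ t.length := by omega
        have hu : ((c :: t).take 3).length = 3 := by simp; omega
        have hr' : (c :: t).drop 3 ≠ [] := by
          intro h; have := congrArg List.length h; simp at this; omega
        have hsplit : c :: t = (c :: t).take 3 ++ (c :: t).drop 3 :=
          (List.take_append_drop 3 (c :: t)).symm
        obtain ⟨d, t', hd⟩ := List.exists_cons_of_ne_nil hr'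
        have hrevne : ((c :: t).drop 3).reverse ≠ [] := by simp [hd]
        calc pvF (c :: t).reverse
            = pvF (((c :: t).drop 3).reverse ++ ((c :: t).take 3).reverse) := by
              conv_lhs => rw [hsplit]
              rw [List.reverse_append]
          _ = pvF' ((c :: t).drop 3).reverse ++ ((c :: t).take 3).reverse := by
              rw [pvF_append3 _ _ (by simp; omega)]
          _ = pvF ((c :: t).drop 3).reverse ++ ['_'] ++ ((c :: t).take 3).reverse := by
              rw [pvF'_eq _ hrevne]
          _ = (PySem.Chars.join ['_'] (pvChunks3 ((c :: t).drop 3))).reverse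
                ++ ['_'] ++ ((c :: t).take 3).reverse := by
              rw [pvF_rev ((c :: t).drop 3)]
          _ = (PySem.Chars.join ['_'] (pvChunks3 (c :: t))).reverse := by
              have hchunks : pvChunks3 (c :: t)
                  = (c :: t).take 3 :: pvChunks3 ((c :: t).drop 3) := by rw [pvChunks3]
              have hchunks2 : pvChunks3 (d :: t')
                  = (d :: t').take 3 :: pvChunks3 ((d :: t').drop 3) := by rw [pvChunks3]
              rw [hchunks, hd, hchunks2, PySem.Chars.join_cons_cons, ← hchunks2, ← hd]
              simp
  termination_by r => r.length
  decreasing_by simp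

-- A's foldl over range(len) computes pvF of the char list
theorem pvA_loop (s : List Char) :
    (PySem.List.pyRange 0 (s.length : Int) 1).foldl
      (fun acc i =>
        let acc := acc ++ (PySem.List.pyGet? s i).toList
        if PySem.Int.mod ((s.length : Int) - i - 1) 3 = 0 ∧ i ≠ (s.length : Int) - 1
        then acc ++ ['_'] else acc)
      [] = pvF s := by
  have hbody : (fun (acc : List Char) (i : Int) =>
      let acc := acc ++ (PySem.List.pyGet? s i).toList
      if PySem.Int.mod ((s.length : Int) - i - 1) 3 = 0 ∧ i ≠ (s.length : Int) - 1
      then acc ++ ['_'] else acc)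
    = (fun acc i => acc ++
        ((PySem.List.pyGet? s i).toList ++
          (if PySem.Int.mod ((s.length : Int) - i - 1) 3 = 0 ∧ i ≠ (s.length : Int) - 1
           then ['_'] else []))) := by
    funext acc i; split_ifs <;> simp
  rw [hbody, PySem.List.foldl_append_eq_flatMap, List.nil_append]
  rw [PySem.List.pyRange_one 0 (s.length : Int)]
  simp only [Int.sub_zero, Int.toNat_natCast, List.flatMap_map]
  clear hbody
  induction s with
  | nil => simp [pvF]
  | cons c t ih =>
      rw [List.length_cons, List.range_succ_eq_map]
      rw [List.flatMap_cons, List.flatMap_map]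
      have h0 : PySem.List.pyGet? (c :: t) ((0:Int) + ((0:Nat) : Int)) = some c := by
        simp
      have hmod : PySem.Int.mod (((t.length + 1 : Nat) : Int) - ((0:Int) + ((0:Nat) : Int)) - 1) 3 = 0
          ↔ t.length % 3 = 0 := by
        rw [PySem.Int.mod_eq_emod_of_pos (by norm_num : (0:Int) < 3)]
        simp; omega
      have hlast : ((0:Int) + ((0:Nat) : Int) ≠ ((t.length + 1 : Nat) : Int) - 1) ↔ t ≠ [] := by
        simp; constructor
        · intro h he; apply h; simp [he]
        · intro h he; apply h; apply List.eq_nil_of_length_eq_zero; omega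
      have htail : ∀ k ∈ List.range t.length,
          ((PySem.List.pyGet? (c :: t) ((0:Int) + ((Nat.succ k : Nat) : Int))).toList ++
            (if PySem.Int.mod (((t.length + 1 : Nat) : Int) - ((0:Int) + ((Nat.succ k : Nat) : Int)) - 1) 3 = 0
                ∧ ((0:Int) + ((Nat.succ k : Nat) : Int)) ≠ ((t.length + 1 : Nat) : Int) - 1
             then ['_'] else []))
          = ((PySem.List.pyGet? t ((0:Int) + ((k : Nat) : Int))).toList ++
            (if PySem.Int.mod (((t.length : Nat) : Int) - ((0:Int) + ((k : Nat) : Int)) - 1) 3 = 0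
                ∧ ((0:Int) + ((k : Nat) : Int)) ≠ ((t.length : Nat) : Int) - 1
             then ['_'] else [])) := by
        intro k hk
        have hget : PySem.List.pyGet? (c :: t) ((0:Int) + ((Nat.succ k : Nat) : Int))
            = PySem.List.pyGet? t ((0:Int) + ((k : Nat) : Int)) := by
          have : ((0:Int) + ((Nat.succ k : Nat) : Int)) = ((k : Int) + 1) := by push_cast; ring
          rw [this, PySem.List.pyGet?_cons_succ]; simp
        have e1 : ((t.length + 1 : Nat) : Int) - ((0:Int) + ((Nat.succ k : Nat) : Int)) - 1
            = ((t.length : Nat) : Int) - ((0:Int) + ((k : Nat) : Int)) - 1 := by push_cast; ring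
        have e2 : (((0:Int) + ((Nat.succ k : Nat) : Int)) ≠ ((t.length + 1 : Nat) : Int) - 1)
            ↔ (((0:Int) + ((k : Nat) : Int)) ≠ ((t.length : Nat) : Int) - 1) := by
          push_cast; omega
        rw [hget]
        simp only [e1, e2]
      rw [List.flatMap_congr htail, ih, h0]
      by_cases hc : t.length % 3 = 0 ∧ t ≠ []
      · rw [if_pos (by rw [hmod, hlast]; exact hc)]
        simp [pvF, hc]
      · rw [if_neg (by rw [hmod, hlast]; exact hc)]
        simp only [Option.toList_some, List.append_nil, List.singleton_append]
        rw [pvF]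
        rw [if_neg hc]

-- ===== VERDICT (by name: the statement is the Claim_ definition above) =====
theorem add_underscores_spec : Claim_equal_add_underscores := by
  intro num _
  unfold Spec_add_underscores add_underscores add_underscores_alt
  simp only
  rw [pvA_loop (PySem.Int.toChars num)]
  rw [← List.reverse_reverse (PySem.Int.toChars num), pvF_rev]
  simp
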